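-- pv_equiv track=rewrite | github.com/lizi12/PythonCourse | hw1_question2.py | pali_check
-- ===== SOURCE A (Python) =====
-- def pali_check(num,dig_num):
--     """
--    Get a number and number of digits.
--    Return if the last number of digit of this number is a palindrome.
--
--    """
--     div_num =  10**dig_num
--     first_digits = (num // div_num) * div_num
--     num = num - first_digits
--     temp=num
--     rev=0
--     while(num>0):
--         dig=num%10
--         rev=rev*10+dig
--         num=num//10
--
--     hezka = 10**(dig_num-1)
--     s_con = temp//hezka
--     if(temp==rev) and (s_con>0 or temp==0):
--         return True
--     else:
--         return False
-- ===== SOURCE B (Python) =====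
-- def pali_check(num, dig_num):
--     """Same result as A on dig_num >= 0: string-based palindrome test on the
--     last dig_num digits instead of arithmetic digit reversal."""
--     temp = num % (10 ** dig_num)
--     if temp == 0:
--         return True
--     s = str(temp)
--     return len(s) == dig_num and s == s[::-1]
-- ===== Notes on version B (the rewrite author's own statement) =====
-- stated objective: simpler
-- what changed: Replaces A's subtract-and-while-loop arithmetic digit reversal (rev=rev*10+dig) and the 10**(dig_num-1) quotient test with a single modulo, str() and a string slice: last-block extraction is num % 10**dig_num, the full-width test is len(str(temp)) == dig_num, and the palindrome test is s == s[::-1].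
-- outside the precondition, e.g. on pali_check(5, -2): A returns True, B returns False
import Mathlib
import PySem

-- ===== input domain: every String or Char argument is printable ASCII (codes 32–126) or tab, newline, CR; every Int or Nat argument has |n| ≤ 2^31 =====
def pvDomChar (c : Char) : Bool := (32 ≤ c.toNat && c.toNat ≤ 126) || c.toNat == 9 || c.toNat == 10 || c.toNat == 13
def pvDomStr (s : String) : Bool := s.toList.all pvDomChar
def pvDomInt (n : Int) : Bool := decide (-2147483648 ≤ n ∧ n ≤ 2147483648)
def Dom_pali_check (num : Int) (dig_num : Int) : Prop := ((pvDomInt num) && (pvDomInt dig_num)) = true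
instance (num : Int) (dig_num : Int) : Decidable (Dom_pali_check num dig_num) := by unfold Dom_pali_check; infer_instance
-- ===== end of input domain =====

-- B replaces A's while-loop arithmetic digit reversal and quotient test with str(temp):
-- a length comparison and a string-reversal palindrome test ('simpler').

-- ===== PORT A =====
-- the 'while(num>0): dig=num%10; rev=rev*10+dig; num=num//10' loop of A
def pvRevLoop (num : Int) (rev : Int) : Int :=
  if h : 0 < num then
    pvRevLoop (PySem.Int.floordiv num 10) (rev * 10 + PySem.Int.mod num 10)
  else rev
termination_by num.toNat
decreasing_by
  have h10 : PySem.Int.floordiv num 10 = num / 10 :=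
    PySem.Int.floordiv_eq_ediv_of_pos (by norm_num)
  rw [h10]; omega

def pali_check (num : Int) (dig_num : Int) : Bool :=
  let div_num : Int := 10 ^ dig_num.toNat
  let first_digits : Int := (PySem.Int.floordiv num div_num) * div_num
  let num1 : Int := num - first_digits
  let temp : Int := num1
  let rev : Int := pvRevLoop num1 0
  let hezka : Int := 10 ^ (dig_num - 1).toNat
  let s_con : Int := PySem.Int.floordiv temp hezka
  if temp = rev ∧ (s_con > 0 ∨ temp = 0) then true else false

-- ===== PORT B =====
def pali_check_alt (num : Int) (dig_num : Int) : Bool :=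
  let temp : Int := PySem.Int.mod num (10 ^ dig_num.toNat)
  if temp = 0 then true
  else
    -- s = str(temp); s[::-1] is s.reverse (PySem.Str.slice?_none_none_neg_one); ported on the List Char side
    let s : List Char := PySem.Int.toChars temp
    decide ((s.length : Int) = dig_num) && decide (s = s.reverse)

-- ===== PRECONDITION & SPEC =====
-- Pre_ excludes dig_num < 0, where Python's 10**dig_num is a float and A computes with
-- float arithmetic (e.g. A(5,-2) returns True via 5 % 0.01) — not portable under the Int convention.
def Pre_pali_check (num : Int) (dig_num : Int) : Prop := 0 ≤ dig_num
instance (num : Int) (dig_num : Int) : Decidable (Pre_pali_check num dig_num) := by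
  unfold Pre_pali_check; infer_instance
def pvWitness_pali_check : Int × Int := (121, 3)

def Spec_pali_check (num : Int) (dig_num : Int) (out : Bool) : Prop := out = pali_check_alt num dig_num
instance (num : Int) (dig_num : Int) (out : Bool) : Decidable (Spec_pali_check num dig_num out) := by unfold Spec_pali_check; infer_instance

-- ===== CLAIM (what is proved, stated in full; the proofs are below) =====
def Claim_equal_pali_check : Prop := ∀ (num : Int) (dig_num : Int), Dom_pali_check num dig_num → Pre_pali_check num dig_num → Spec_pali_check num dig_num (pali_check num dig_num)

-- ===== LEMMAS AND PROOFS =====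

-- digitChar is injective on decimal digits
theorem pv_digitChar_inj (a b : ℕ) (ha : a < 10) (hb : b < 10)
    (h : Nat.digitChar a = Nat.digitChar b) : a = b := by
  interval_cases a <;> interval_cases b <;> revert h <;> decide

theorem pv_map_digitChar_inj (l1 l2 : List ℕ) (h1 : ∀ x ∈ l1, x < 10) (h2 : ∀ x ∈ l2, x < 10)
    (h : l1.map Nat.digitChar = l2.map Nat.digitChar) : l1 = l2 := by
  induction l1 generalizing l2 with
  | nil => cases l2 <;> simp_all
  | cons a t ih =>
    cases l2 with
    | nil => simp_all
    | cons b u =>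
      simp only [List.map_cons, List.cons.injEq] at h
      have hab : a = b := pv_digitChar_inj a b (h1 a (by simp)) (h2 b (by simp)) h.1
      have htu : t = u :=
        ih u (fun x hx => h1 x (List.mem_cons_of_mem a hx))
          (fun x hx => h2 x (List.mem_cons_of_mem b hx)) h.2
      simp [hab, htu]

-- core's toDigitsCore, characterised via Nat.digits
theorem pv_toDigitsCore_eq (f : ℕ) : ∀ (n : ℕ) (l : List Char), n ≠ 0 → n < f →
    Nat.toDigitsCore 10 f n l = ((Nat.digits 10 n).map Nat.digitChar).reverse ++ l := by
  induction f with
  | zero => intro n l _ hf; omega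
  | succ f ih =>
    intro n l hn hf
    simp only [Nat.toDigitsCore]
    by_cases h : n / 10 = 0
    · have hlt : n < 10 := by omega
      rw [Nat.digits_of_lt 10 n hn hlt]
      simp [Nat.mod_eq_of_lt hlt, h]
    · have hdiv : n / 10 < f := lt_of_lt_of_le (Nat.div_lt_self (by omega) (by norm_num)) (by omega)
      rw [if_neg h, ih (n / 10) _ h hdiv, Nat.digits_def' (by norm_num : 1 < 10) (by omega : 0 < n)]
      simp

theorem pv_toChars_natCast (t : ℕ) (ht : t ≠ 0) :
    PySem.Int.toChars (t : Int) = ((Nat.digits 10 t).map Nat.digitChar).reverse := by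
  have hneg : ¬ ((t : Int) < 0) := by omega
  simp only [PySem.Int.toChars, hneg, if_false, Int.toNat_natCast]
  unfold Nat.toDigits
  rw [pv_toDigitsCore_eq (t + 1) t [] ht (by omega)]
  simp

-- the reversal loop computes ofDigits of the reversed digit list
theorem pv_revLoop_natCast (m : ℕ) : ∀ (acc : Int),
    pvRevLoop (m : Int) acc
      = ((Nat.ofDigits 10 (Nat.digits 10 m).reverse : ℕ) : Int)
          + acc * 10 ^ (Nat.digits 10 m).length := by
  induction m using Nat.strongRecOn with
  | ind m ih =>
    intro acc
    rw [pvRevLoop]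
    by_cases hm : m = 0
    · subst hm
      norm_num [Nat.ofDigits_nil]
    · have hpos : (0 : Int) < (m : Int) := by omega
      rw [dif_pos hpos]
      have hfd : PySem.Int.floordiv (m : Int) 10 = ((m / 10 : ℕ) : Int) := by
        exact_mod_cast PySem.Int.floordiv_natCast m 10
      have hmd : PySem.Int.mod (m : Int) 10 = ((m % 10 : ℕ) : Int) := by
        exact_mod_cast PySem.Int.mod_natCast m 10
      rw [hfd, hmd, ih (m / 10) (Nat.div_lt_self (by omega) (by norm_num))]
      rw [Nat.digits_def' (by norm_num : 1 < 10) (by omega : 0 < m), List.reverse_cons]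
      have happ : Nat.ofDigits 10 ((Nat.digits 10 (m / 10)).reverse ++ [m % 10])
          = Nat.ofDigits 10 (Nat.digits 10 (m / 10)).reverse
              + 10 ^ (Nat.digits 10 (m / 10)).reverse.length * (m % 10) := by
        rw [Nat.ofDigits_append, Nat.ofDigits_singleton]
      rw [happ]
      simp only [List.length_reverse, List.length_cons]
      push_cast
      ring

-- ===== VERDICT (by name: the statement is the Claim_ definition above) =====
theorem pali_check_spec : Claim_equal_pali_check := by
  intro num dig_num _ hpre
  unfold Spec_pali_check
  simp only [pali_check, pali_check_alt]
  set d : ℕ := dig_num.toNat with hdn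
  have hdeq : (d : Int) = dig_num := Int.toNat_of_nonneg hpre
  have hDpos : (0 : Int) < 10 ^ d := by positivity
  have htemp : num - PySem.Int.floordiv num (10 ^ d) * 10 ^ d = PySem.Int.mod num (10 ^ d) := by
    have := PySem.Int.floordiv_mul_add_mod num (10 ^ d)
    linarith
  rw [htemp]
  have ht0 : 0 ≤ PySem.Int.mod num (10 ^ d) := PySem.Int.mod_nonneg num hDpos
  have htD : PySem.Int.mod num (10 ^ d) < 10 ^ d := PySem.Int.mod_lt num hDpos
  generalize hT : PySem.Int.mod num (10 ^ d) = t at ht0 htD ⊢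
  by_cases h0 : t = 0
  · rw [h0]
    rw [pvRevLoop]
    norm_num
  · rw [if_neg h0]
    obtain ⟨m, rfl⟩ := Int.eq_ofNat_of_zero_le ht0
    have hm0 : m ≠ 0 := by exact_mod_cast h0
    have hmD : m < 10 ^ d := by exact_mod_cast htD
    have hd1 : 1 ≤ d := by
      rcases Nat.eq_zero_or_pos d with h | h
      · exfalso; rw [h, pow_zero] at hmD; omega
      · exact h
    have hdig1 : (dig_num - 1).toNat = d - 1 := by omega
    set L : List ℕ := Nat.digits 10 m with hL
    have hLlt : ∀ x ∈ L, x < 10 := fun x hx => Nat.digits_lt_base (by norm_num) hx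
    have hLrlt : ∀ x ∈ L.reverse, x < 10 := fun x hx => hLlt x (List.mem_reverse.mp hx)
    have hofd : Nat.ofDigits 10 L = m := Nat.ofDigits_digits 10 m
    have hrev : pvRevLoop (m : Int) 0 = ((Nat.ofDigits 10 L.reverse : ℕ) : Int) := by
      rw [pv_revLoop_natCast m 0]; ring
    have hchars : PySem.Int.toChars (m : Int) = (L.map Nat.digitChar).reverse :=
      pv_toChars_natCast m hm0
    have hlenle : L.length ≤ d := (Nat.digits_length_le_iff (by norm_num) m).mpr hmD
    have hlen_iff : (L.length = d) ↔ 10 ^ (d - 1) ≤ m := by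
      rw [← Nat.lt_digits_length_iff (by norm_num : 1 < 10), ← hL]
      omega
    have hscon : (PySem.Int.floordiv (m : Int) (10 ^ (dig_num - 1).toNat) > 0)
        ↔ 10 ^ (d - 1) ≤ m := by
      rw [hdig1]
      have hHpos : (0 : Int) < 10 ^ (d - 1) := by positivity
      constructor
      · intro h
        have h1 : (1 : Int) ≤ PySem.Int.floordiv (m : Int) (10 ^ (d - 1)) := by omega
        have h2 := (PySem.Int.le_floordiv_iff_mul_le hHpos).mp h1
        rw [one_mul] at h2
        exact_mod_cast h2
      · intro h
        have h1 : (1 : Int) * 10 ^ (d - 1) ≤ (m : Int) := by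
          rw [one_mul]; exact_mod_cast h
        have h2 := (PySem.Int.le_floordiv_iff_mul_le hHpos).mpr h1
        omega
    have emapr : L.reverse.map Nat.digitChar = (L.map Nat.digitChar).reverse := by simp
    have hpal : ((L.map Nat.digitChar).reverse = ((L.map Nat.digitChar).reverse).reverse)
        ↔ L = L.reverse := by
      rw [List.reverse_reverse]
      constructor
      · intro h
        rw [← emapr] at h
        exact (pv_map_digitChar_inj L.reverse L hLrlt hLlt h).symm
      · intro h
        rw [← emapr, ← h]
    have harith : ((m : Int) = ((Nat.ofDigits 10 L.reverse : ℕ) : Int)) ↔ L = L.reverse := by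
      rw [Int.natCast_inj]
      constructor
      · intro h
        exact Nat.ofDigits_inj_of_len_eq (by norm_num) (by simp) hLlt hLrlt (hofd.trans h)
      · intro h
        rw [← h]; exact hofd.symm
    have hlen2 : ((((L.map Nat.digitChar).reverse).length : Int) = dig_num) ↔ 10 ^ (d - 1) ≤ m := by
      rw [List.length_reverse, List.length_map, ← hdeq, Int.natCast_inj]
      exact hlen_iff
    rw [hrev, hchars]
    by_cases hA : L = L.reverse <;> by_cases hB : 10 ^ (d - 1) ≤ m
    · rw [if_pos ⟨harith.mpr hA, Or.inl (hscon.mpr hB)⟩,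
        decide_eq_true (hlen2.mpr hB), decide_eq_true (hpal.mpr hA)]
      rfl
    · rw [if_neg (by
        rintro ⟨-, h2 | h2⟩
        exacts [hB (hscon.mp h2), h0 h2])]
      rw [decide_eq_false (fun hq => hB (hlen2.mp hq)), Bool.false_and]
    · rw [if_neg (by rintro ⟨h1, -⟩; exact hA (harith.mp h1))]
      rw [decide_eq_false (fun hq => hA (hpal.mp hq)), Bool.and_false]
    · rw [if_neg (by rintro ⟨h1, -⟩; exact hA (harith.mp h1))]
      rw [decide_eq_false (fun hq => hB (hlen2.mp hq)), Bool.false_and]
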